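-- pv_equiv track=rewrite | github.com/loremru/inf-lab | encode.py | make_answer
-- ===== SOURCE A (Python) =====
-- def make_answer(arr):
--     answer = ""
--     temp_length = 20
--     i = 0
--     is_reverse = False
--     while True:
--         if i == 4:
--             i -= 1
--             is_reverse = True
--         elif i == 0:
--             is_reverse = False
--         if temp_length > 0:
--             new_range = range(len(arr[i]) -1, -1, -1) if is_reverse else range(len(arr[i]))
--             for j in new_range:
--                 if temp_length > 0:
--                     item = arr[i][j]
--                     answer += item
--                     temp_length -= 1
--                 else:
--                     break
--             i += -1 if is_reverse else 1
--         else: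
--             break
--     return answer
-- ===== SOURCE B (Python) =====
-- # Closed-form "tile and slice": build the one zigzag period string, repeat it, cut 20 chars.
-- def make_answer(arr):
--     rows = arr[:4]
--     forward = "".join(rows)
--     backward = "".join(r[::-1] for r in reversed(rows[1:]))
--     cycle = forward + backward
--     return (cycle * 20)[:20]
-- ===== Notes on version B (the rewrite author's own statement) =====
-- stated objective: simpler
-- what changed: Replaced A's stateful while-loop (mutable row index, direction flag, per-character countdown) by a closed-form construction: build the single zigzag period string once (rows 0-3 forward plus rows 3..1 reversed), repeat it by string multiplication and slice the first 20 characters; no traversal state machine remains. Pre_ excludes inputs where A raises IndexError (fewer than 4 rows holding under 20 characters) or loops forever (rows 0-3 all empty).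
import Mathlib
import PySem

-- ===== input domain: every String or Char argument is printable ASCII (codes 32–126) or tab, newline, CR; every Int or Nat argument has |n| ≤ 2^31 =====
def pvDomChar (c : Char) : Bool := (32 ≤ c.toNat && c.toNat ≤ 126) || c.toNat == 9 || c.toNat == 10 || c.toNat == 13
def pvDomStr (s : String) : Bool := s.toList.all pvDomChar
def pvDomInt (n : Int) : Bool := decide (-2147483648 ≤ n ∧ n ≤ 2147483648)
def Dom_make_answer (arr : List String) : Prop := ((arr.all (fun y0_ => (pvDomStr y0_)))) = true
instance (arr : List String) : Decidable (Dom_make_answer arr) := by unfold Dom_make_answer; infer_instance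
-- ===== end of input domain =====

-- B replaces A's stateful zigzag while-loop by a closed-form construction: build the one
-- zigzag period string, repeat it, slice the first 20 characters (objective: simpler).

-- ===== PORT A =====
-- the state-normalisation at the top of A's while-loop body
def pvNorm (i : Int) (isRev : Bool) : Int × Bool :=
  if i == 4 then (i - 1, true) else if i == 0 then (i, false) else (i, isRev)

-- A's inner 'for j in new_range' loop (break when temp_length hits 0);
-- pyGet? = none is Python's IndexError, excluded by Pre_ (port skips, unreachable inside Pre_)
def pvAInner (row : List Char) (js : List Int) (answer : List Char) (temp : Int) : List Char × Int :=
  match js with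
  | [] => (answer, temp)
  | j :: rest =>
    if temp > 0 then
      match PySem.List.pyGet? row j with
      | some c => pvAInner row rest (answer ++ [c]) (temp - 1)
      | none => pvAInner row rest answer (temp - 1)
    else (answer, temp)

-- A's 'while True' loop, with a fuel bound (Pre_ guarantees termination well within it;
-- pyGet? arr i = none is Python's IndexError, excluded by Pre_)
def pvAOuter (arr : List String) (fuel : Nat) (answer : List Char) (temp : Int) (i : Int) (isRev : Bool) : List Char :=
  match fuel with
  | 0 => answer
  | fuel + 1 =>
    let p := pvNorm i isRev
    if temp > 0 then
      let row := ((PySem.List.pyGet? arr p.1).getD "").toList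
      let js := if p.2 then PySem.List.pyRange ((row.length : Int) - 1) (-1) (-1)
                else PySem.List.pyRange 0 (row.length : Int) 1
      let r := pvAInner row js answer temp
      pvAOuter arr fuel r.1 r.2 (if p.2 then p.1 - 1 else p.1 + 1) p.2
    else answer

def make_answer (arr : List String) : String := String.ofList (pvAOuter arr 1000 [] 20 0 false)

-- ===== PORT B =====
-- rows = arr[:4]; forward = "".join(rows); backward = "".join(r[::-1] for r in reversed(rows[1:]));
-- cycle = forward + backward; return (cycle * 20)[:20]
def make_answer_alt (arr : List String) : String :=
  let rows := PySem.List.slice arr none (some 4)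
  let forward := (rows.map String.toList).flatten
  let backward := (((PySem.List.slice rows (some 1) none).reverse).map
      (fun r => r.toList.reverse)).flatten
  let cycle := forward ++ backward
  String.ofList (PySem.List.slice ((List.replicate 20 cycle).flatten) none (some 20))

-- ===== PRECONDITION & SPEC =====
-- Pre_ = exactly the inputs on which A returns: with ≥ 4 rows A needs a character somewhere in rows
-- 0..3 (else it loops forever); with < 4 rows it needs 20 characters before the IndexError at arr[len].
def Pre_make_answer (arr : List String) : Prop :=
  (4 ≤ arr.length ∧ 0 < ((arr.take 4).map (fun s => s.toList.length)).sum) ∨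
  (arr.length < 4 ∧ 20 ≤ (arr.map (fun s => s.toList.length)).sum)
instance (arr : List String) : Decidable (Pre_make_answer arr) := by unfold Pre_make_answer; infer_instance

def pvWitness_make_answer : List String := ["abcde", "fghij", "klmno", "pqrst"]

def Spec_make_answer (arr : List String) (out : String) : Prop := out = make_answer_alt arr
instance (arr : List String) (out : String) : Decidable (Spec_make_answer arr out) := by unfold Spec_make_answer; infer_instance

-- ===== CLAIM (what is proved, stated in full; the proofs are below) =====
def Claim_equal_make_answer : Prop := ∀ (arr : List String), Dom_make_answer arr → Pre_make_answer arr → Spec_make_answer arr (make_answer arr)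

-- ===== LEMMAS AND PROOFS =====

-- the 7-entry zigzag pattern of (row, reversed) pairs that A's state machine walks through
def pvPattern : List (Int × Bool) :=
  [(0, false), (1, false), (2, false), (3, false), (3, true), (2, true), (1, true)]

-- the character segment contributed by pattern position r (r is always taken mod 7)
def pvSeg (arr : List String) (r : Nat) : List Char :=
  let p := pvPattern.getD r (0, false)
  let chars := ((PySem.List.pyGet? arr p.1).getD "").toList
  if p.2 then chars.reverse else chars

-- the zigzag character stream: n segments starting at pattern position k
def pvStream (arr : List String) (k n : Nat) : List Char :=
  (List.range n).flatMap (fun m => pvSeg arr ((k + m) % 7))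

theorem pvStream_succ (arr : List String) (k n : Nat) :
    pvStream arr k (n + 1) = pvSeg arr (k % 7) ++ pvStream arr (k + 1) n := by
  have hr : List.range (n+1) = 0 :: (List.range n).map (·+1) := by
    simpa [Nat.succ_eq_add_one, Function.comp] using (List.range_succ_eq_map (n := n))
  have hm : ∀ m : Nat, (k + (m + 1)) % 7 = (k + 1 + m) % 7 := by
    intro m; ring_nf
  simp only [pvStream, hr, List.flatMap_cons, List.flatMap_map, hm, Nat.add_zero]

theorem pvStream_add (arr : List String) (k a b : Nat) :
    pvStream arr k (a + b) = pvStream arr k a ++ pvStream arr (k + a) b := by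
  have hm : ∀ m : Nat, (k + (a + m)) % 7 = (k + a + m) % 7 := by
    intro m; ring_nf
  simp only [pvStream, List.range_add, List.flatMap_append, List.flatMap_map, hm]

-- A's inner loop gathers min(temp, |js|) characters
theorem pvAInner_spec (row : List Char) (d : Char) :
    ∀ (js : List Int) (answer : List Char) (temp : Int), 0 ≤ temp →
      (∀ j ∈ js, PySem.List.pyGet? row j = some (PySem.List.pyGetD row j d)) →
      pvAInner row js answer temp =
        (answer ++ (js.map (fun j => PySem.List.pyGetD row j d)).take temp.toNat,
         temp - min temp (js.length : Int)) := by
  intro js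
  induction js with
  | nil =>
    intro answer temp ht _
    simp [pvAInner]
    omega
  | cons j rest ih =>
    intro answer temp ht hv
    rw [pvAInner]
    by_cases h : temp > 0
    · rw [if_pos h, hv j (by simp)]
      simp only []
      rw [ih (answer ++ [PySem.List.pyGetD row j d]) (temp - 1) (by omega)
            (fun j hj => hv j (by simp [hj]))]
      have h1 : temp.toNat = (temp - 1).toNat + 1 := by omega
      rw [Prod.mk.injEq]
      constructor
      · rw [List.map_cons, h1, List.take_succ_cons, List.append_assoc]
        rfl
      · simp only [List.length_cons]
        omega
    · rw [if_neg h]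
      have h0 : temp = 0 := by omega
      subst h0
      simp
      omega

-- the two concrete ranges A uses gather the row resp. the reversed row
theorem pvAInner_seg (arr : List String) (r : Nat) (answer : List Char) (temp : Int)
    (ht : 0 ≤ temp) :
    pvAInner (((PySem.List.pyGet? arr (pvPattern.getD r (0, false)).1).getD "").toList)
      (if (pvPattern.getD r (0, false)).2 then
        PySem.List.pyRange (((((PySem.List.pyGet? arr (pvPattern.getD r (0, false)).1).getD "").toList.length : Int)) - 1) (-1) (-1)
       else PySem.List.pyRange 0 (((PySem.List.pyGet? arr (pvPattern.getD r (0, false)).1).getD "").toList.length : Int) 1)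
      answer temp =
      (answer ++ (pvSeg arr r).take temp.toNat,
       temp - min temp ((pvSeg arr r).length : Int)) := by
  simp only [pvSeg]
  set p := pvPattern.getD r (0, false) with hp
  set row := ((PySem.List.pyGet? arr p.1).getD "").toList with hrow
  have hv : ∀ j ∈ PySem.List.pyRange 0 (row.length : Int) 1,
      PySem.List.pyGet? row j = some (PySem.List.pyGetD row j 'x') := by
    intro j hj
    obtain ⟨h0, h1⟩ := PySem.List.mem_pyRange_one.mp hj
    rw [PySem.List.pyGet?_eq_some_getElem row h0 h1]
    simp [PySem.List.pyGetD, PySem.List.pyGet?_eq_some_getElem row h0 h1]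
  have hfwd := PySem.List.map_pyGetD_pyRange_zero' row 'x'
  have hlen : (PySem.List.pyRange 0 (row.length : Int) 1).length = row.length := by
    rw [PySem.List.length_pyRange_one]; omega
  have hrev : PySem.List.pyRange ((row.length : Int) - 1) (-1) (-1)
      = (PySem.List.pyRange 0 (row.length : Int) 1).reverse := by
    rw [PySem.List.pyRange_neg_one_eq_reverse]
    norm_num
  by_cases hb : p.2
  · simp only [hb, if_true]
    rw [hrev, pvAInner_spec row 'x' _ answer temp ht (by simpa using hv)]
    rw [List.map_reverse, hfwd]
    simp [hlen]
  · simp only [hb, if_false, Bool.false_eq_true]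
    rw [pvAInner_spec row 'x' _ answer temp ht hv, hfwd, hlen]

theorem pvAOuter_zero_temp (arr : List String) (f : Nat) (ans : List Char) (i : Int) (b : Bool) :
    pvAOuter arr f ans 0 i b = ans := by
  cases f <;> simp [pvAOuter]

theorem pvNorm_step (r : Nat) (hr : r < 7) :
    pvNorm (if (pvPattern.getD r (0, false)).2 then (pvPattern.getD r (0, false)).1 - 1
            else (pvPattern.getD r (0, false)).1 + 1)
           (pvPattern.getD r (0, false)).2
      = pvPattern.getD ((r + 1) % 7) (0, false) := by
  interval_cases r <;> decide

-- A's outer loop: as long as enough characters remain in the stream, it takes temp of them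
theorem pvAOuter_spec (arr : List String) (fuel : Nat) :
    ∀ (k : Nat) (answer : List Char) (temp : Int) (i : Int) (isRev : Bool),
      pvNorm i isRev = pvPattern.getD (k % 7) (0, false) →
      0 < temp →
      temp.toNat ≤ (pvStream arr k fuel).length →
      pvAOuter arr (fuel + 1) answer temp i isRev =
        answer ++ (pvStream arr k fuel).take temp.toNat := by
  induction fuel with
  | zero =>
    intro k answer temp i isRev hnorm ht hlen
    simp [pvStream] at hlen
    omega
  | succ f ih =>
    intro k answer temp i isRev hnorm ht hlen
    rw [pvAOuter]
    simp only [hnorm]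
    rw [if_pos (by omega : temp > 0)]
    rw [pvAInner_seg arr (k % 7) answer temp (by omega)]
    have hstep : pvNorm (if (pvPattern.getD (k % 7) (0, false)).2 then (pvPattern.getD (k % 7) (0, false)).1 - 1
            else (pvPattern.getD (k % 7) (0, false)).1 + 1) (pvPattern.getD (k % 7) (0, false)).2
        = pvPattern.getD ((k + 1) % 7) (0, false) := by
      rw [pvNorm_step (k % 7) (Nat.mod_lt _ (by norm_num))]
      congr 1
      omega
    have hsplit : pvStream arr k (f + 1) = pvSeg arr (k % 7) ++ pvStream arr (k + 1) f :=
      pvStream_succ arr k f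
    rw [hsplit] at hlen ⊢
    rw [List.length_append] at hlen
    by_cases hle : temp ≤ ((pvSeg arr (k % 7)).length : Int)
    · have hmin : temp - min temp ((pvSeg arr (k % 7)).length : Int) = 0 := by omega
      rw [hmin, pvAOuter_zero_temp]
      rw [List.take_append_of_le_length (by omega)]
    · have hmin : temp - min temp ((pvSeg arr (k % 7)).length : Int)
          = temp - ((pvSeg arr (k % 7)).length : Int) := by omega
      rw [hmin]
      rw [ih (k + 1) _ _ _ _ hstep (by omega) (by omega)]
      rw [List.take_append, List.take_of_length_le (by omega), List.append_assoc]
      congr 3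
      omega

theorem pvStream_shift (arr : List String) (m n : Nat) :
    pvStream arr (7 * m) n = pvStream arr 0 n := by
  have h : ∀ j : Nat, (7 * m + j) % 7 = (0 + j) % 7 := by
    intro j
    omega
  simp only [pvStream, h]

-- B's repeated cycle is the stream: cycle = one period, replicate m = stream of 7*m segments
theorem pvReplicate_eq_stream (arr : List String) (m : Nat) :
    (List.replicate m (pvStream arr 0 7)).flatten = pvStream arr 0 (7 * m) := by
  induction m with
  | zero => simp [pvStream]
  | succ m ih =>
    rw [show 7 * (m + 1) = 7 + 7 * m from by ring, pvStream_add arr 0 7 (7 * m),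
        List.replicate_succ, List.flatten_cons, ih]
    congr 1
    simpa using (pvStream_shift arr 1 (7 * m)).symm

theorem pvStream_cycles (arr : List String) :
    ∀ m : Nat, (pvStream arr 0 (7 * m)).length = m * (pvStream arr 0 7).length := by
  intro m
  rw [← pvReplicate_eq_stream]
  induction m with
  | zero => simp
  | succ m ih => rw [List.replicate_succ, List.flatten_cons, List.length_append, ih]; ring

-- B's cycle string is exactly one period of the zigzag stream, for every arr
theorem pvCycle_eq_period (arr : List String) :
    ((PySem.List.slice arr none (some 4)).map String.toList).flatten ++
      ((((PySem.List.slice (PySem.List.slice arr none (some 4)) (some 1) none).reverse).map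
        (fun r => r.toList.reverse)).flatten)
      = pvStream arr 0 7 := by
  rw [PySem.List.slice_to _ (by norm_num), PySem.List.slice_from _ (by norm_num)]
  rcases arr with _ | ⟨a, _ | ⟨b, _ | ⟨c, _ | ⟨d, rest⟩⟩⟩⟩
  · simp [pvStream, pvSeg, pvPattern, List.range_succ, PySem.List.pyGet?,
          PySem.List.pyIdx?]
  · simp [pvStream, pvSeg, pvPattern, List.range_succ, PySem.List.pyGet?,
          PySem.List.pyIdx?]
  · simp [pvStream, pvSeg, pvPattern, List.range_succ, PySem.List.pyGet?,
          PySem.List.pyIdx?]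
  · simp [pvStream, pvSeg, pvPattern, List.range_succ, PySem.List.pyGet?,
          PySem.List.pyIdx?]
  · have g0 := PySem.List.pyGet?_ofNat (a :: b :: c :: d :: rest) 0 (by simp)
    have g1 := PySem.List.pyGet?_ofNat (a :: b :: c :: d :: rest) 1 (by simp)
    have g2 := PySem.List.pyGet?_ofNat (a :: b :: c :: d :: rest) 2 (by simp)
    have g3 := PySem.List.pyGet?_ofNat (a :: b :: c :: d :: rest) 3 (by simp)
    norm_num at g1 g2 g3
    simp [pvStream, pvSeg, pvPattern, List.range_succ, g1, g2, g3]

-- Pre_ guarantees the first 140 segments (20 periods) hold at least 20 characters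
theorem pvStream_long (arr : List String) (hpre : Pre_make_answer arr) :
    20 ≤ (pvStream arr 0 140).length := by
  rcases arr with _ | ⟨a, _ | ⟨b, _ | ⟨c, _ | ⟨d, rest⟩⟩⟩⟩ <;>
    simp only [Pre_make_answer, List.length_cons, List.length_nil] at hpre
  · rcases hpre with ⟨h, _⟩ | ⟨_, h⟩ <;> simp at h
  · rcases hpre with ⟨h, _⟩ | ⟨_, h⟩
    · omega
    · rw [show (140 : Nat) = 4 + 136 from rfl, pvStream_add, List.length_append]
      have hc : (pvStream [a] 0 4).length = a.length := by
        simp [pvStream, pvSeg, pvPattern, List.range_succ, PySem.List.pyGet?,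
              PySem.List.pyIdx?]
      simp at h
      omega
  · rcases hpre with ⟨h, _⟩ | ⟨_, h⟩
    · omega
    · rw [show (140 : Nat) = 4 + 136 from rfl, pvStream_add, List.length_append]
      have hc : (pvStream [a, b] 0 4).length = a.length + b.length := by
        simp [pvStream, pvSeg, pvPattern, List.range_succ, PySem.List.pyGet?,
              PySem.List.pyIdx?]
      simp at h
      omega
  · rcases hpre with ⟨h, _⟩ | ⟨_, h⟩
    · omega
    · rw [show (140 : Nat) = 4 + 136 from rfl, pvStream_add, List.length_append]
      have hc : (pvStream [a, b, c] 0 4).length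
          = a.length + b.length + c.length := by
        simp [pvStream, pvSeg, pvPattern, List.range_succ, PySem.List.pyGet?,
              PySem.List.pyIdx?]
        omega
      simp at h
      omega
  · rcases hpre with ⟨_, h⟩ | ⟨h, _⟩
    swap
    · omega
    have g1 := PySem.List.pyGet?_ofNat (a :: b :: c :: d :: rest) 1 (by simp)
    have g2 := PySem.List.pyGet?_ofNat (a :: b :: c :: d :: rest) 2 (by simp)
    have g3 := PySem.List.pyGet?_ofNat (a :: b :: c :: d :: rest) 3 (by simp)
    norm_num at g1 g2 g3
    have hc : (pvStream (a :: b :: c :: d :: rest) 0 7).length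
        = a.length + b.length + c.length + d.length
          + d.length + c.length + b.length := by
      simp [pvStream, pvSeg, pvPattern, List.range_succ, g1, g2, g3]
      omega
    rw [show (140 : Nat) = 7 * 20 from rfl, pvStream_cycles]
    simp at h
    rw [hc]
    omega

-- ===== VERDICT (by name: the statement is the Claim_ definition above) =====
theorem make_answer_spec : Claim_equal_make_answer := by
  intro arr _ hpre
  unfold Spec_make_answer make_answer make_answer_alt
  have hlong := pvStream_long arr hpre
  have hlong999 : 20 ≤ (pvStream arr 0 999).length := by
    rw [show (999 : Nat) = 140 + 859 from rfl, pvStream_add, List.length_append]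
    omega
  have hA := pvAOuter_spec arr 999 0 [] 20 0 false (by decide) (by norm_num)
    (by simpa using hlong999)
  rw [hA]
  simp only [List.nil_append]
  rw [pvCycle_eq_period arr, pvReplicate_eq_stream arr 20,
      PySem.List.slice_to _ (by norm_num)]
  rw [show (999 : Nat) = 7 * 20 + 859 from rfl, pvStream_add,
      List.take_append_of_le_length (by simpa using hlong)]
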